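-- pv_equiv track=rewrite | github.com/TomUijtdehaag/aoc-2025 | d04/main.py | update
-- ===== SOURCE A (Python) =====
-- def update(grid: list[str], remove: list[tuple[int, int]]) -> list[str]:
--     new_grid = []
--
--     for y, line in enumerate(grid):
--         new_line = ""
--         for x, pos in enumerate(line):
--             if (x, y) in remove:
--                 new_line += "x"
--             else:
--                 new_line += pos
--
--         new_grid.append(new_line)
--
--     return new_grid
-- ===== SOURCE B (Python) =====
-- def update(grid: list[str], remove: list[tuple[int, int]]) -> list[str]:
--     rows = [list(line) for line in grid]
--     for x, y in remove:
--         if 0 <= y < len(rows) and 0 <= x < len(rows[y]):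
--             rows[y][x] = "x"
--     return ["".join(row) for row in rows]
-- ===== Notes on version B (the rewrite author's own statement) =====
-- stated objective: faster
-- what changed: B scatters writes over the remove list into a mutable list-of-char-lists copy of the grid (guarding out-of-range coordinates), instead of A's dense scan of every cell with a linear membership test against remove.
import Mathlib
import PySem

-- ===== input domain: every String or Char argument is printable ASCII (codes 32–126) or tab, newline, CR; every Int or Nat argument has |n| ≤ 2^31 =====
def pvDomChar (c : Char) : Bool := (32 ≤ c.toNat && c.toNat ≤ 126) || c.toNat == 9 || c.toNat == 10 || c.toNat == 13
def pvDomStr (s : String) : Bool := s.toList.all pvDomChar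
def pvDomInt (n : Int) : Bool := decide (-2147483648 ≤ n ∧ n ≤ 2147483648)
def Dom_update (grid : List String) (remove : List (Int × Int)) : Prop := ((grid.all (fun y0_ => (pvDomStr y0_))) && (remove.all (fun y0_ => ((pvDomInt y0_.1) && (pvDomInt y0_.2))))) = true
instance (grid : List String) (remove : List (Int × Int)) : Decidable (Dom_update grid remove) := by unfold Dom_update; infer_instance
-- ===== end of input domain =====

-- B replaces A's dense scan of every cell (with a list-membership test per cell) by a
-- scatter over the remove list into a mutable row/character table; same return value.

-- ===== PORT A =====
-- strings are handled as List Char with String.ofList at the end ('new_line += c' = append one char)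
def update (grid : List String) (remove : List (Int × Int)) : List String :=
  (PySem.List.enumerate grid).foldl (fun new_grid yl =>
    new_grid ++ [String.ofList ((PySem.List.enumerate yl.2.toList).foldl (fun nl xp =>
      if (xp.1, yl.1) ∈ remove then nl ++ ['x'] else nl ++ [xp.2]) [])]) []

-- ===== PORT B =====
-- rows = [list(line) for line in grid]; in-place writes become List.set on the row table
def update_alt (grid : List String) (remove : List (Int × Int)) : List String :=
  let rows0 := grid.map String.toList
  let rows := remove.foldl (fun rs p =>
    if 0 ≤ p.2 ∧ p.2 < (rs.length : Int) ∧ 0 ≤ p.1 ∧ p.1 < (((rs[p.2.toNat]?).getD []).length : Int) then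
      rs.set p.2.toNat (((rs[p.2.toNat]?).getD []).set p.1.toNat 'x')
    else rs) rows0
  rows.map String.ofList

-- ===== PRECONDITION & SPEC =====
def Spec_update (grid : List String) (remove : List (Int × Int)) (out : List String) : Prop := out = update_alt grid remove
instance (grid : List String) (remove : List (Int × Int)) (out : List String) : Decidable (Spec_update grid remove out) := by unfold Spec_update; infer_instance

-- ===== CLAIM (what is proved, stated in full; the proofs are below) =====
def Claim_equal_update : Prop := ∀ (grid : List String) (remove : List (Int × Int)), Dom_update grid remove → Spec_update grid remove (update grid remove)

-- ===== LEMMAS AND PROOFS =====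

-- the masked grid: 'x' wherever the (column, row) index pair is in remove
def pvMask (remove : List (Int × Int)) (rows : List (List Char)) : List (List Char) :=
  rows.mapIdx (fun y row => row.mapIdx (fun x c => if ((x : Int), (y : Int)) ∈ remove then 'x' else c))

-- a foldl that appends one element per step is a map
theorem pv_foldl_snoc {α β : Type} (step : List β → α → List β) (f : α → β)
    (h : ∀ acc a, step acc a = acc ++ [f a]) :
    ∀ (l : List α) (init : List β), l.foldl step init = init ++ l.map f := by
  intro l
  induction l with
  | nil => intro init; simp
  | cons a t ih => intro init; simp [List.foldl_cons, h, ih]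

-- enumerate-then-map is mapIdx (indices cast to Int)
theorem pv_enumerate_map {α β : Type} (l : List α) (g : Int → α → β) :
    (PySem.List.enumerate l).map (fun p => g p.1 p.2) = l.mapIdx (fun i a => g (i : Int) a) := by
  apply List.ext_getElem
  · simp [PySem.List.length_enumerate]
  · intro k h1 h2
    simp [PySem.List.getElem_enumerate]

-- A computes the masked grid
theorem pv_A_eq_mask (grid : List String) (remove : List (Int × Int)) :
    update grid remove = (pvMask remove (grid.map String.toList)).map String.ofList := by
  unfold update
  rw [pv_foldl_snoc _ (fun yl => String.ofList ((PySem.List.enumerate yl.2.toList).foldl (fun nl xp =>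
      if (xp.1, yl.1) ∈ remove then nl ++ ['x'] else nl ++ [xp.2]) []))
      (by intro acc a; rfl)]
  simp only [List.nil_append]
  have inner : ∀ (y : Int) (cs : List Char),
      (PySem.List.enumerate cs).foldl (fun nl xp =>
        if (xp.1, y) ∈ remove then nl ++ ['x'] else nl ++ [xp.2]) [] =
      cs.mapIdx (fun x c => if ((x : Int), y) ∈ remove then 'x' else c) := by
    intro y cs
    rw [pv_foldl_snoc _ (fun xp => if (xp.1, y) ∈ remove then 'x' else xp.2)
        (by intro acc a; by_cases h : (a.1, y) ∈ remove <;> simp [h])]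
    rw [pv_enumerate_map cs (fun x c => if (x, y) ∈ remove then 'x' else c)]
    simp
  rw [pv_enumerate_map grid (fun y line => String.ofList ((PySem.List.enumerate line.toList).foldl
      (fun nl xp => if (xp.1, y) ∈ remove then nl ++ ['x'] else nl ++ [xp.2]) []))]
  unfold pvMask
  apply List.ext_getElem
  · simp
  · intro k h1 h2
    simp only [List.getElem_mapIdx, List.getElem_map]
    rw [inner]

-- one scatter write commutes into the mask
theorem pv_step_mask (r : List (Int × Int)) (p : Int × Int) (rows : List (List Char)) :
    pvMask r (if 0 ≤ p.2 ∧ p.2 < (rows.length : Int) ∧ 0 ≤ p.1 ∧ p.1 < (((rows[p.2.toNat]?).getD []).length : Int) then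
      rows.set p.2.toNat (((rows[p.2.toNat]?).getD []).set p.1.toNat 'x')
    else rows) = pvMask (p :: r) rows := by
  obtain ⟨px, py⟩ := p
  unfold pvMask
  apply List.ext_getElem
  · split <;> simp
  · intro y hy1 hy2
    split
    case isTrue h =>
      obtain ⟨h1, h2, h3, h4⟩ := h
      have hyl : py.toNat < rows.length := by omega
      have hget : (rows[py.toNat]?).getD [] = rows[py.toNat] := by
        simp [List.getElem?_eq_getElem hyl]
      rw [hget] at h4
      have hxl : px.toNat < rows[py.toNat].length := by omega
      have e2 : ((py.toNat : Nat) : Int) = py := Int.toNat_of_nonneg h1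
      have e1 : ((px.toNat : Nat) : Int) = px := Int.toNat_of_nonneg h3
      simp only [hget, List.getElem_mapIdx, List.getElem_set]
      by_cases hyy : py.toNat = y
      · subst hyy
        rw [if_pos rfl]
        apply List.ext_getElem
        · simp
        · intro x hx1 hx2
          simp only [List.getElem_mapIdx, List.getElem_set, List.mem_cons, e2]
          by_cases hm : ((x : Int), py) ∈ r
          · simp [hm]
          · by_cases hxx : px.toNat = x
            · have hpx : px = (x : Int) := by omega
              simp [hm, hxx, hpx, Prod.mk.injEq]
            · have hpx : ¬ ((x : Int) = px) := by omega
              simp [hm, hxx, hpx, Prod.mk.injEq]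
      · rw [if_neg hyy]
        apply List.ext_getElem
        · simp
        · intro x hx1 hx2
          simp only [List.getElem_mapIdx, List.mem_cons]
          by_cases hm : ((x : Int), (y : Int)) ∈ r
          · simp [hm]
          · have hpy : ¬ ((y : Int) = py) := by omega
            simp [hm, hpy, Prod.mk.injEq]
    case isFalse h =>
      have hyr : y < rows.length := by simpa using hy2
      simp only [List.getElem_mapIdx]
      apply List.ext_getElem
      · simp
      · intro x hx1 hx2
        simp only [List.getElem_mapIdx, List.mem_cons]
        have hlen : x < (rows[y]).length := by simpa using hx1
        by_cases hm : ((x : Int), (y : Int)) ∈ r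
        · simp [hm]
        · have hne : ¬ (((x : Int), (y : Int)) = (px, py)) := by
            intro he
            apply h
            have e1 : px = (x : Int) := by rw [Prod.mk.injEq] at he; omega
            have e2 : py = (y : Int) := by rw [Prod.mk.injEq] at he; omega
            refine ⟨by omega, by omega, by omega, ?_⟩
            have hg : (rows[py.toNat]?).getD [] = rows[y] := by
              have ht : py.toNat = y := by omega
              simp [ht, List.getElem?_eq_getElem hyr]
            rw [hg]
            omega
          simp [hm, hne]

-- the whole scatter fold computes the masked grid
theorem pv_fold_mask : ∀ (remove : List (Int × Int)) (rows : List (List Char)),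
    remove.foldl (fun rs p =>
      if 0 ≤ p.2 ∧ p.2 < (rs.length : Int) ∧ 0 ≤ p.1 ∧ p.1 < (((rs[p.2.toNat]?).getD []).length : Int) then
        rs.set p.2.toNat (((rs[p.2.toNat]?).getD []).set p.1.toNat 'x')
      else rs) rows = pvMask remove rows := by
  intro remove
  induction remove with
  | nil =>
    intro rows
    unfold pvMask
    apply List.ext_getElem
    · simp
    · intro y hy1 hy2
      simp [List.getElem_mapIdx]
      apply List.ext_getElem <;> simp [List.getElem_mapIdx]
  | cons p r ih =>
    intro rows
    rw [List.foldl_cons, ih, pv_step_mask]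

-- ===== VERDICT (by name: the statement is the Claim_ definition above) =====
theorem update_spec : Claim_equal_update := by
  intro grid remove _
  unfold Spec_update
  simp only [update_alt]
  rw [pv_A_eq_mask, pv_fold_mask]
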